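-- pv_equiv track=rewrite | github.com/mitfusco98/HealthPrepV2 | services/specialty_preset_enhancer.py | _group_by_base_name
-- ===== SOURCE A (Python) =====
-- from collections import defaultdict
--
-- def _group_by_base_name(screening_types_data):
--     """Group screening types by their base name (before the dash)"""
--     groups = defaultdict(list)
--
--     for st_data in screening_types_data:
--         name = st_data.get('name', '')
--
--         if ' - ' in name:
--             # Extract base name (everything before first dash)
--             base_name = name.split(' - ')[0].strip()
--             groups[base_name].append(st_data)
--         else:
--             # This is already a base type
--             groups[name].append(st_data)
--
--     return dict(groups)
-- ===== SOURCE B (Python) =====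
-- def _group_by_base_name(screening_types_data):
--     """Group screening types by their base name (before the dash)"""
--     def base_key(st_data):
--         name = st_data.get('name', '')
--         if ' - ' in name:
--             return name.split(' - ')[0].strip()
--         return name
--
--     keys = list(dict.fromkeys(base_key(st) for st in screening_types_data))
--     return {k: [st for st in screening_types_data if base_key(st) == k]
--             for k in keys}
-- ===== Notes on version B (the rewrite author's own statement) =====
-- stated objective: alternative
-- what changed: Replaces the single mutating-defaultdict pass with a two-phase decomposition: dedup the base-name keys in first-appearance order, then build the result with a dict comprehension that filters the input per key.
import Mathlib
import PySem

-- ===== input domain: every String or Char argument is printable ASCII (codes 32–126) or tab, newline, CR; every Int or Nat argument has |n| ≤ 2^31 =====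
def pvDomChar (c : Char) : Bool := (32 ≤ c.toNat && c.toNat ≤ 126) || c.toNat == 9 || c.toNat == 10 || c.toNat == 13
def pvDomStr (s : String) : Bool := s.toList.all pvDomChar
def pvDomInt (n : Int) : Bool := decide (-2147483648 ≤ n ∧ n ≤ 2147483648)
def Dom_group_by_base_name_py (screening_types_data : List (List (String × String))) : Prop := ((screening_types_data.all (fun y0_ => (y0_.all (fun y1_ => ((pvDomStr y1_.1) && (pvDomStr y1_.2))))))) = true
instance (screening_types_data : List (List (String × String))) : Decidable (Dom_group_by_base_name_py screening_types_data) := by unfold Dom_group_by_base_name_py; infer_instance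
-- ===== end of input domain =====

-- B replaces A's single mutating-defaultdict pass with a two-phase decomposition
-- (dedup the keys in first-appearance order, then filter the input once per key);
-- alternative structure, not claimed faster; return value only.

-- ===== PORT A =====
-- literal transliteration of A: one fold over the data, appending into an
-- insertion-ordered dict (defaultdict(list) → Dict.modify key [] (· ++ [st]))
def group_by_base_name_py (screening_types_data : List (List (String × String))) : List (String × List (List (String × String))) :=
  let groups : PySem.Dict String (List (List (String × String))) :=
    screening_types_data.foldl
      (fun groups st_data =>
        let name := (PySem.Dict.mk st_data).getD "name" ""
        if PySem.Str.isIn " - " name then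
          let base_name := PySem.Str.strip (PySem.List.pyGetD ((PySem.Str.split? name " - ").getD []) 0 "")
          groups.modify base_name [] (· ++ [st_data])
        else
          groups.modify name [] (· ++ [st_data]))
      PySem.Dict.empty
  groups.items

-- ===== PORT B =====
-- Source B's base_key helper
def pvBaseKey (st_data : List (String × String)) : String :=
  let name := (PySem.Dict.mk st_data).getD "name" ""
  if PySem.Str.isIn " - " name then
    PySem.Str.strip (PySem.List.pyGetD ((PySem.Str.split? name " - ").getD []) 0 "")
  else
    name

-- literal transliteration of B: dedup the keys, then one filter of the data per key
def group_by_base_name_py_alt (screening_types_data : List (List (String × String))) : List (String × List (List (String × String))) :=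
  let keys := PySem.List.dedup (screening_types_data.map pvBaseKey)
  keys.map (fun k => (k, screening_types_data.filter (fun st => pvBaseKey st == k)))

-- ===== PRECONDITION & SPEC =====
def Spec_group_by_base_name_py (screening_types_data : List (List (String × String))) (out : List (String × List (List (String × String)))) : Prop := out = group_by_base_name_py_alt screening_types_data
instance (screening_types_data : List (List (String × String))) (out : List (String × List (List (String × String)))) : Decidable (Spec_group_by_base_name_py screening_types_data out) := by unfold Spec_group_by_base_name_py; infer_instance

-- ===== CLAIM (what is proved, stated in full; the proofs are below) =====
def Claim_equal_group_by_base_name_py : Prop := ∀ (screening_types_data : List (List (String × String))), Dom_group_by_base_name_py screening_types_data → Spec_group_by_base_name_py screening_types_data (group_by_base_name_py screening_types_data)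

-- ===== LEMMAS AND PROOFS =====

-- A's fold body is "modify at the branch-selected key", i.e. modify at pvBaseKey
theorem pvFoldA_eq (screening_types_data : List (List (String × String))) :
    screening_types_data.foldl
      (fun (groups : PySem.Dict String (List (List (String × String)))) st_data =>
        let name := (PySem.Dict.mk st_data).getD "name" ""
        if PySem.Str.isIn " - " name then
          let base_name := PySem.Str.strip (PySem.List.pyGetD ((PySem.Str.split? name " - ").getD []) 0 "")
          groups.modify base_name [] (· ++ [st_data])
        else
          groups.modify name [] (· ++ [st_data]))
      PySem.Dict.empty
    = screening_types_data.foldl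
        (fun groups st_data => groups.modify (pvBaseKey st_data) [] (· ++ [st_data]))
        PySem.Dict.empty := by
  congr 1
  funext d st
  simp only [pvBaseKey]
  split <;> rfl

-- the per-key value of A's dict is B's filter of the data
theorem pvGetD_eq (screening_types_data : List (List (String × String))) (k : String) :
    (screening_types_data.foldl
        (fun (groups : PySem.Dict String (List (List (String × String)))) st_data =>
          groups.modify (pvBaseKey st_data) [] (· ++ [st_data]))
        PySem.Dict.empty).getD k []
    = screening_types_data.filter (fun st => pvBaseKey st == k) := by
  have h := PySem.Dict.getD_foldl_modify_append
      (screening_types_data.map (fun st => (pvBaseKey st, st)))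
      (PySem.Dict.empty (κ := String) (ν := List (List (String × String)))) k
  rw [List.foldl_map] at h
  rw [List.filter_map] at h
  simpa [Function.comp_def] using h

-- ===== VERDICT (by name: the statement is the Claim_ definition above) =====
theorem group_by_base_name_py_spec : Claim_equal_group_by_base_name_py := by
  intro data _
  show group_by_base_name_py data = group_by_base_name_py_alt data
  unfold group_by_base_name_py group_by_base_name_py_alt
  rw [pvFoldA_eq]
  have hnd : (data.foldl
      (fun (groups : PySem.Dict String (List (List (String × String)))) st_data =>
        groups.modify (pvBaseKey st_data) [] (· ++ [st_data]))
      PySem.Dict.empty).keys.Nodup := by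
    apply PySem.Dict.nodup_keys_foldl_modify_key data pvBaseKey [] (fun d st v => v ++ [st])
    simp [PySem.Dict.keys_empty]
  rw [PySem.Dict.items_eq_map_keys _ hnd []]
  rw [PySem.Dict.keys_foldl_modify_key data pvBaseKey [] (fun d st v => v ++ [st])]
  rw [PySem.Dict.keys_empty, PySem.Set.update_nil_left, PySem.List.dedup_eq_ofList]
  apply List.map_congr_left
  intro k _
  rw [pvGetD_eq]
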